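-- pv_equiv track=rewrite | github.com/hilzhosting-design/procoder | main.py | get_overdue_numbers
-- ===== SOURCE A (Python) =====
-- def get_overdue_numbers(historical_draws, count=5):
--     """Identifies numbers that haven't appeared for longer than their average skip interval."""
--     if not historical_draws: return []
--     last_seen = {}
--     for i, draw in enumerate(reversed(historical_draws)):
--         for num in draw[1]: # Main numbers
--             last_seen[num] = i + 1
--
--     if not last_seen: return []
--
--     # Calculate how many draws ago each number appeared (most recent is len(historical_draws))
--     draws_since_seen = {num: len(historical_draws) - (pos -1) for num, pos in last_seen.items()}
--
--     # Simple approach: Return the numbers that haven't been seen the longest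
--     overdue = sorted(draws_since_seen.items(), key=lambda item: item[1], reverse=True)
--     return [num for num, _ in overdue[:count]]
-- ===== SOURCE B (Python) =====
-- def get_overdue_numbers(historical_draws, count=5):
--     """Identifies numbers that haven't appeared for longer than their average skip interval."""
--     if not historical_draws:
--         return []
--     last_seen = {}
--     for i, draw in enumerate(reversed(historical_draws)):
--         for num in draw[1]:
--             last_seen[num] = i + 1
--
--     if not last_seen:
--         return []
--
--     # Bucket pass instead of sorting: descending "draws since seen" is exactly
--     # ascending last_seen position, with insertion order breaking ties (stable sort).
--     n = len(historical_draws)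
--     buckets = [[] for _ in range(n)]
--     for num, pos in last_seen.items():
--         buckets[pos - 1].append(num)
--     result = [num for bucket in buckets for num in bucket]
--     return result[:count]
-- ===== Notes on version B (the rewrite author's own statement) =====
-- stated objective: alternative
-- what changed: B drops the draws_since_seen dict and the stable reverse sort entirely: it distributes last_seen's entries into position-indexed buckets in one pass and concatenates the buckets, which reproduces the descending-staleness order with the same tie-breaking.
import Mathlib
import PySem

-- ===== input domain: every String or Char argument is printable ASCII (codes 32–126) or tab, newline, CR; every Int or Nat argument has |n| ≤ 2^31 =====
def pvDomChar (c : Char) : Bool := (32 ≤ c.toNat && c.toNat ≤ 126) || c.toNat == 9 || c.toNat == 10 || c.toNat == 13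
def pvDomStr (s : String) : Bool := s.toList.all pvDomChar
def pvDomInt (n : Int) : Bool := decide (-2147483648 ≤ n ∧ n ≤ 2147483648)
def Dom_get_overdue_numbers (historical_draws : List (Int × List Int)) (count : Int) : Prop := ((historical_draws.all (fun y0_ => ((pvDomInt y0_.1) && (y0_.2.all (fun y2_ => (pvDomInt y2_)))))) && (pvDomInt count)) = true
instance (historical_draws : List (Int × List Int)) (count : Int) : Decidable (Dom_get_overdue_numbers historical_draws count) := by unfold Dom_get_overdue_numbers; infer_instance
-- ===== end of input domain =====

-- B replaces the draws_since_seen dict and the stable reverse sort by a single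
-- counting/bucket pass over last_seen (both programs build last_seen by the same loop).

-- ===== PORT A =====
-- shared helper: the last_seen-building loop, identical in Source A and Source B
-- (for i, draw in enumerate(reversed(historical_draws)): for num in draw[1]: last_seen[num] = i + 1)
def pvLastSeen (historical_draws : List (Int × List Int)) : PySem.Dict Int Int :=
  (PySem.List.enumerate historical_draws.reverse).foldl
    (fun d ia => ia.2.2.foldl (fun d num => d.insert num (ia.1 + 1)) d)
    PySem.Dict.empty

def get_overdue_numbers (historical_draws : List (Int × List Int)) (count : Int) : List Int :=
  if historical_draws = [] then []
  else
    let last_seen := pvLastSeen historical_draws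
    if last_seen.items = [] then []
    else
      -- {num: len(historical_draws) - (pos - 1) for num, pos in last_seen.items()}
      let draws_since_seen : PySem.Dict Int Int :=
        PySem.Dict.ofList (last_seen.items.map
          (fun p => (p.1, (historical_draws.length : Int) - (p.2 - 1))))
      -- sorted(draws_since_seen.items(), key=lambda item: item[1], reverse=True)
      let overdue := PySem.List.sorted draws_since_seen.items (fun item => item.2) true
      -- [num for num, _ in overdue[:count]]
      (PySem.List.slice overdue none (some count)).map (fun p => p.1)

-- ===== PORT B =====
-- buckets[k].append(x); out-of-range k leaves buckets unchanged (never reached: 0 ≤ pos-1 < n)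
def pvAppendAt : List (List Int) → Nat → Int → List (List Int)
  | [], _, _ => []
  | b :: bs, 0, x => (b ++ [x]) :: bs
  | b :: bs, Nat.succ k, x => b :: pvAppendAt bs k x

def get_overdue_numbers_alt (historical_draws : List (Int × List Int)) (count : Int) : List Int :=
  if historical_draws = [] then []
  else
    let last_seen := pvLastSeen historical_draws
    if last_seen.items = [] then []
    else
      let n := historical_draws.length
      -- buckets = [[] for _ in range(n)]; for num, pos in last_seen.items(): buckets[pos-1].append(num)
      let buckets := last_seen.items.foldl
        (fun bs p => pvAppendAt bs (p.2 - 1).toNat p.1) (List.replicate n [])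
      -- [num for bucket in buckets for num in bucket][:count]
      PySem.List.slice buckets.flatten none (some count)

-- ===== PRECONDITION & SPEC =====
def Spec_get_overdue_numbers (historical_draws : List (Int × List Int)) (count : Int) (out : List Int) : Prop := out = get_overdue_numbers_alt historical_draws count
instance (historical_draws : List (Int × List Int)) (count : Int) (out : List Int) : Decidable (Spec_get_overdue_numbers historical_draws count out) := by unfold Spec_get_overdue_numbers; infer_instance

-- ===== CLAIM (what is proved, stated in full; the proofs are below) =====
def Claim_equal_get_overdue_numbers : Prop := ∀ (historical_draws : List (Int × List Int)) (count : Int), Dom_get_overdue_numbers historical_draws count → Spec_get_overdue_numbers historical_draws count (get_overdue_numbers historical_draws count)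

-- ===== LEMMAS AND PROOFS =====

-- the buckets of pairs, in A's (descending-key) order: bucket j holds key n - j
def pvKeyBuckets (n : Nat) (l : List (Int × Int)) : List (Int × Int) :=
  (List.range n).flatMap (fun j : Nat => l.filter (fun p => p.2 == (n : Int) - (j : Int)))

lemma pvFlatMap_congr {α β : Type} (as : List α) (f g : α → List β)
    (h : ∀ a ∈ as, f a = g a) : as.flatMap f = as.flatMap g := by
  induction as with
  | nil => rfl
  | cons a as ih =>
    simp only [List.flatMap_cons, h a (by simp), ih (fun a ha => h a (by simp [ha]))]

lemma pvInsertBy_append (bef : Int × Int → Int × Int → Bool) (x : Int × Int)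
    (as bs : List (Int × Int)) (h : ∀ y ∈ as, bef x y = false) :
    PySem.List.insertBy bef x (as ++ bs) = as ++ PySem.List.insertBy bef x bs := by
  induction as with
  | nil => simp
  | cons a as ih =>
    simp only [List.cons_append, PySem.List.insertBy, h a (by simp)]
    simp only [Bool.false_eq_true, if_false]
    exact congrArg (a :: ·) (ih (fun y hy => h y (by simp [hy])))

lemma pvInsert_keyBuckets (n : Nat) (l : List (Int × Int)) (x : Int × Int)
    (hx1 : 1 ≤ x.2) (hx2 : x.2 ≤ (n : Int)) :
    PySem.List.insertBy (fun a b => decide (b.2 < a.2)) x (pvKeyBuckets n l)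
      = pvKeyBuckets n (l ++ [x]) := by
  -- x belongs to bucket j0, and n = (j0 + 1) + m
  set j0 : Nat := n - x.2.toNat with hj0def
  have hxt : (x.2.toNat : Int) = x.2 := Int.toNat_of_nonneg (by omega)
  have hj0n : j0 < n := by omega
  have hj0 : (n : Int) - (j0 : Int) = x.2 := by omega
  obtain ⟨m, hm⟩ : ∃ m, n = (j0 + 1) + m := ⟨n - (j0 + 1), by omega⟩
  have hsplit : List.range n = List.range (j0 + 1) ++ (List.range m).map (fun i => (j0 + 1) + i) := by
    rw [hm, List.range_add]
  have hC1 : ∀ y ∈ (List.range (j0 + 1)).flatMap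
      (fun j : Nat => l.filter (fun p => p.2 == (n : Int) - (j : Int))), x.2 ≤ y.2 := by
    intro y hy
    simp only [List.mem_flatMap, List.mem_range, List.mem_filter, beq_iff_eq] at hy
    obtain ⟨j, hj, _, hyj⟩ := hy
    omega
  have hC2 : ∀ y ∈ ((List.range m).map (fun i => (j0 + 1) + i)).flatMap
      (fun j : Nat => l.filter (fun p => p.2 == (n : Int) - (j : Int))), y.2 < x.2 := by
    intro y hy
    simp only [List.mem_flatMap, List.mem_map, List.mem_range, List.mem_filter, beq_iff_eq] at hy
    obtain ⟨j, ⟨i, hi, hij⟩, _, hyj⟩ := hy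
    omega
  have hfil : ∀ j : Nat, (l ++ [x]).filter (fun p => p.2 == (n : Int) - (j : Int))
      = l.filter (fun p => p.2 == (n : Int) - (j : Int))
        ++ (if j = j0 then [x] else []) := by
    intro j
    rw [List.filter_append]
    congr 1
    by_cases hj : j = j0
    · subst hj
      have hb : (x.2 == (n : Int) - (j0 : Int)) = true := beq_iff_eq.mpr (by omega)
      simp [List.filter, hb]
    · have hb : (x.2 == (n : Int) - (j : Int)) = false := beq_eq_false_iff_ne.mpr (by omega)
      simp [List.filter, hb, hj]
  unfold pvKeyBuckets
  rw [hsplit, List.flatMap_append, List.flatMap_append]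
  rw [pvInsertBy_append _ _ _ _ (fun y hy => by
    simp only [decide_eq_false_iff_not, not_lt]; exact hC1 y hy)]
  -- x is inserted right at the head of the second half
  have hins : PySem.List.insertBy (fun a b => decide (b.2 < a.2)) x
      (((List.range m).map (fun i => (j0 + 1) + i)).flatMap
        (fun j : Nat => l.filter (fun p => p.2 == (n : Int) - (j : Int))))
      = x :: ((List.range m).map (fun i => (j0 + 1) + i)).flatMap
        (fun j : Nat => l.filter (fun p => p.2 == (n : Int) - (j : Int))) := by
    cases hc : ((List.range m).map (fun i => (j0 + 1) + i)).flatMap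
        (fun j : Nat => l.filter (fun p => p.2 == (n : Int) - (j : Int))) with
    | nil => simp [PySem.List.insertBy]
    | cons y t =>
      have hy : y.2 < x.2 := hC2 y (by rw [hc]; exact List.mem_cons_self)
      simp [PySem.List.insertBy, hy]
  rw [hins]
  -- second half of the right side is unchanged
  have h2 : ((List.range m).map (fun i => (j0 + 1) + i)).flatMap
      (fun j : Nat => (l ++ [x]).filter (fun p => p.2 == (n : Int) - (j : Int)))
      = ((List.range m).map (fun i => (j0 + 1) + i)).flatMap
      (fun j : Nat => l.filter (fun p => p.2 == (n : Int) - (j : Int))) := by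
    apply pvFlatMap_congr
    intro j hj
    rw [hfil j]
    simp only [List.mem_map, List.mem_range] at hj
    obtain ⟨i, hi, hij⟩ := hj
    have hne : j ≠ j0 := by omega
    simp [hne]
  rw [h2]
  -- first half of the right side gains x at its very end (end of bucket j0)
  have h1 : (List.range (j0 + 1)).flatMap
      (fun j : Nat => (l ++ [x]).filter (fun p => p.2 == (n : Int) - (j : Int)))
      = (List.range (j0 + 1)).flatMap
        (fun j : Nat => l.filter (fun p => p.2 == (n : Int) - (j : Int))) ++ [x] := by
    rw [List.range_succ, List.flatMap_append, List.flatMap_append]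
    have ha : (List.range j0).flatMap
        (fun j : Nat => (l ++ [x]).filter (fun p => p.2 == (n : Int) - (j : Int)))
        = (List.range j0).flatMap
        (fun j : Nat => l.filter (fun p => p.2 == (n : Int) - (j : Int))) := by
      apply pvFlatMap_congr
      intro j hj
      rw [hfil j]
      simp only [List.mem_range] at hj
      simp [Nat.ne_of_lt hj]
    rw [ha]
    simp [List.append_assoc]
    omega
  rw [h1]
  simp [List.append_assoc]

lemma pvSortedRev_eq_keyBuckets (n : Nat) (l : List (Int × Int))
    (h : ∀ p ∈ l, 1 ≤ p.2 ∧ p.2 ≤ (n : Int)) :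
    PySem.List.sorted l (fun p => p.2) true = pvKeyBuckets n l := by
  rw [PySem.List.sorted_rev_eq_foldl_insertBy]
  induction l using List.reverseRecOn with
  | nil => simp [pvKeyBuckets]
  | append_singleton l x ih =>
    rw [List.foldl_append, List.foldl_cons, List.foldl_nil]
    rw [ih (fun p hp => h p (by simp [hp]))]
    exact pvInsert_keyBuckets n l x (h x (by simp)).1 (h x (by simp)).2

-- ===== B-side bucket fold =====
lemma pvLength_appendAt (bs : List (List Int)) (k : Nat) (x : Int) :
    (pvAppendAt bs k x).length = bs.length := by
  induction bs generalizing k with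
  | nil => rfl
  | cons b bs ih => cases k <;> simp [pvAppendAt, ih]

lemma pvGetElem_appendAt (bs : List (List Int)) (k : Nat) (x : Int) (j : Nat)
    (hj : j < bs.length) (hk : k < bs.length) :
    (pvAppendAt bs k x)[j]'(by rw [pvLength_appendAt]; exact hj)
      = if j = k then bs[j] ++ [x] else bs[j] := by
  induction bs generalizing k j with
  | nil => simp at hj
  | cons b bs ih =>
    cases k with
    | zero => cases j <;> simp [pvAppendAt]
    | succ k =>
      cases j with
      | zero => simp [pvAppendAt]
      | succ j =>
        simp only [pvAppendAt, List.getElem_cons_succ]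
        rw [ih k j (by simpa using hj) (by simpa using hk)]
        simp

lemma pvFoldl_appendAt (n : Nat) (l : List (Int × Int))
    (h : ∀ p ∈ l, 1 ≤ p.2 ∧ p.2 ≤ (n : Int)) :
    l.foldl (fun bs p => pvAppendAt bs (p.2 - 1).toNat p.1) (List.replicate n [])
      = (List.range n).map (fun j : Nat => (l.filter (fun p => p.2 == (j : Int) + 1)).map (fun p => p.1)) := by
  induction l using List.reverseRecOn with
  | nil =>
    simp only [List.foldl_nil, List.filter_nil, List.map_nil]
    simp [List.map_const']
  | append_singleton l x ih =>
    rw [List.foldl_append, List.foldl_cons, List.foldl_nil]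
    rw [ih (fun p hp => h p (by simp [hp]))]
    have hx := h x (by simp)
    have hk : (x.2 - 1).toNat < n := by omega
    apply List.ext_getElem
    · simp [pvLength_appendAt]
    · intro j hj1 hj2
      have hjn : j < n := by simpa using hj2
      rw [pvGetElem_appendAt _ _ _ _ (by simpa) (by simpa using hk)]
      simp only [List.getElem_map, List.getElem_range]
      rw [List.filter_append]
      have hxe : (x.2 - 1).toNat = x.2.toNat - 1 := by omega
      by_cases hjx : j = x.2.toNat - 1
      · have hb : (x.2 == ((x.2.toNat - 1 : Nat) : Int) + 1) = true := beq_iff_eq.mpr (by omega)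
        simp [hxe, hjx, hb]
      · have hb : (x.2 == (j : Int) + 1) = false := beq_eq_false_iff_ne.mpr (by omega)
        simp [hxe, hjx, List.filter, hb]

-- ===== facts about last_seen =====
lemma pvNodup_inner (nums : List Int) (w : Int) (d : PySem.Dict Int Int)
    (h : d.keys.Nodup) : (nums.foldl (fun d num => d.insert num w) d).keys.Nodup :=
  PySem.Dict.nodup_keys_foldl_insert nums (fun _ _ => w) d h

lemma pvNodup_lastSeen (historical_draws : List (Int × List Int)) :
    (pvLastSeen historical_draws).keys.Nodup := by
  unfold pvLastSeen
  generalize (PySem.List.enumerate historical_draws.reverse) = l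
  have : ∀ (l : List (Int × (Int × List Int))) (d : PySem.Dict Int Int), d.keys.Nodup →
      (l.foldl (fun d ia => ia.2.2.foldl (fun d num => d.insert num (ia.1 + 1)) d) d).keys.Nodup := by
    intro l
    induction l with
    | nil => intro d h; exact h
    | cons a l ih => intro d h; exact ih _ (pvNodup_inner a.2.2 (a.1 + 1) d h)
  exact this l PySem.Dict.empty (PySem.Dict.nodup_keys_empty)

lemma pvValues_inner (nums : List Int) (w : Int) (d : PySem.Dict Int Int)
    (P : Int → Prop) (hw : P w) (h : ∀ v ∈ d.values, P v) :
    ∀ v ∈ (nums.foldl (fun d num => d.insert num w) d).values, P v := by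
  induction nums generalizing d with
  | nil => exact h
  | cons a nums ih =>
    intro v hv
    refine ih (d.insert a w) (fun v hv => ?_) v hv
    rcases PySem.Dict.mem_values_insert d a w v hv with h1 | h2
    · exact h1 ▸ hw
    · exact h v h2

lemma pvValues_lastSeen (historical_draws : List (Int × List Int)) :
    ∀ v ∈ (pvLastSeen historical_draws).values,
      1 ≤ v ∧ v ≤ (historical_draws.length : Int) := by
  unfold pvLastSeen
  have key : ∀ (l : List (Int × (Int × List Int))) (d : PySem.Dict Int Int),
      (∀ ia ∈ l, 1 ≤ ia.1 + 1 ∧ ia.1 + 1 ≤ (historical_draws.length : Int)) →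
      (∀ v ∈ d.values, 1 ≤ v ∧ v ≤ (historical_draws.length : Int)) →
      ∀ v ∈ (l.foldl (fun d ia => ia.2.2.foldl (fun d num => d.insert num (ia.1 + 1)) d) d).values,
        1 ≤ v ∧ v ≤ (historical_draws.length : Int) := by
    intro l
    induction l with
    | nil => intro d _ h; exact h
    | cons a l ih =>
      intro d hl h
      exact ih _ (fun ia hia => hl ia (by simp [hia]))
        (pvValues_inner a.2.2 (a.1 + 1) d _ (hl a (by simp)) h)
  refine key _ _ (fun ia hia => ?_) (by intro v hv; simp [PySem.Dict.empty, PySem.Dict.values] at hv)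
  rw [PySem.List.mem_enumerate_iff] at hia
  obtain ⟨k, hk, hia⟩ := hia
  subst hia
  simp only [List.length_reverse] at hk
  refine ⟨by simp, by simp; omega⟩

lemma pvItems_bound (historical_draws : List (Int × List Int)) :
    ∀ p ∈ (pvLastSeen historical_draws).items,
      1 ≤ p.2 ∧ p.2 ≤ (historical_draws.length : Int) := by
  intro p hp
  exact pvValues_lastSeen historical_draws p.2 (by
    simp only [PySem.Dict.values, List.mem_map]
    exact ⟨p, hp, rfl⟩)

-- items of the draws_since_seen dict comprehension
lemma pvItems_ofList_map (historical_draws : List (Int × List Int)) :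
    (PySem.Dict.ofList ((pvLastSeen historical_draws).items.map
        (fun p => (p.1, (historical_draws.length : Int) - (p.2 - 1))))).items
      = (pvLastSeen historical_draws).items.map
        (fun p => (p.1, (historical_draws.length : Int) - (p.2 - 1))) := by
  have hnd : (((pvLastSeen historical_draws).items.map
      (fun p => (p.1, (historical_draws.length : Int) - (p.2 - 1)))).map (fun a => a.1)).Nodup := by
    have he : (((pvLastSeen historical_draws).items.map
        (fun p => (p.1, (historical_draws.length : Int) - (p.2 - 1)))).map (fun a => a.1))
        = (pvLastSeen historical_draws).keys := by
      simp [PySem.Dict.keys, List.map_map, Function.comp]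
    rw [he]
    exact pvNodup_lastSeen historical_draws
  have h := PySem.Dict.items_foldl_insert_fresh
    ((pvLastSeen historical_draws).items.map
      (fun p => (p.1, (historical_draws.length : Int) - (p.2 - 1))))
    (fun a => a.1) (fun a => a.2) PySem.Dict.empty
    (fun a _ => PySem.Dict.contains_empty a.1) hnd
  show (PySem.Dict.empty.update _).items = _
  unfold PySem.Dict.update
  exact h.trans (by simp [PySem.Dict.empty])

-- slice commutes with map (clamping depends only on the length)
lemma pvMap_slice (xs : List (Int × Int)) (c : Int) (f : Int × Int → Int) :
    (PySem.List.slice xs none (some c)).map f = PySem.List.slice (xs.map f) none (some c) := by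
  simp [PySem.List.slice, PySem.List.clampIdx, List.map_take]

-- ===== VERDICT (by name: the statement is the Claim_ definition above) =====
theorem get_overdue_numbers_spec : Claim_equal_get_overdue_numbers := by
  intro historical_draws count _
  unfold Spec_get_overdue_numbers get_overdue_numbers get_overdue_numbers_alt
  by_cases h0 : historical_draws = []
  · simp [h0]
  · simp only [h0, if_false]
    by_cases h1 : (pvLastSeen historical_draws).items = []
    · simp [h1]
    · simp only [h1, if_false]
      set n := historical_draws.length with hn
      set items := (pvLastSeen historical_draws).items with hitems
      have hbound := pvItems_bound historical_draws
      rw [pvItems_ofList_map historical_draws]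
      set f : Int × Int → Int × Int := fun p => (p.1, (n : Int) - (p.2 - 1)) with hf
      have hdsb : ∀ p ∈ items.map f, 1 ≤ p.2 ∧ p.2 ≤ (n : Int) := by
        intro p hp
        simp only [List.mem_map] at hp
        obtain ⟨q, hq, hpq⟩ := hp
        have := hbound q hq
        subst hpq
        simp only [hf]
        omega
      rw [pvSortedRev_eq_keyBuckets n (items.map f) hdsb]
      rw [pvFoldl_appendAt n items hbound]
      rw [pvMap_slice]
      congr 1
      -- map fst of A's buckets = flatten of B's buckets
      unfold pvKeyBuckets
      rw [List.map_flatMap]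
      rw [← List.flatMap_def]
      apply pvFlatMap_congr
      intro j hj
      rw [List.filter_map]
      have hpred : ∀ q ∈ items, ((fun p : Int × Int => p.2 == (n : Int) - (j : Int)) ∘ f) q
          = (q.2 == (j : Int) + 1) := by
        intro q _
        show ((n : Int) - (q.2 - 1) == (n : Int) - (j : Int)) = (q.2 == (j : Int) + 1)
        by_cases hq : q.2 = (j : Int) + 1
        · rw [beq_iff_eq.mpr (show (n : Int) - (q.2 - 1) = (n : Int) - (j : Int) by omega),
            beq_iff_eq.mpr hq]
        · rw [beq_eq_false_iff_ne.mpr (show (n : Int) - (q.2 - 1) ≠ (n : Int) - (j : Int) by omega),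
            beq_eq_false_iff_ne.mpr hq]
      rw [List.filter_congr hpred]
      simp [List.map_map, Function.comp, hf]
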